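-- pv_equiv track=rewrite | github.com/viaifoundation/ting | plan_utils.py | chapters_to_filename
-- ===== SOURCE A (Python) =====
-- BOOK_FILENAME_ABBR: dict[int, str] = {
--     1: "gen", 2: "exo", 3: "lev", 4: "num", 5: "deu",
--     6: "jos", 7: "jdg", 8: "rut", 9: "1sa", 10: "2sa",
--     11: "1ki", 12: "2ki", 13: "1ch", 14: "2ch", 15: "ezr",
--     16: "neh", 17: "est", 18: "job", 19: "ps", 20: "prov",
--     21: "ecc", 22: "sng", 23: "isa", 24: "jer", 25: "lam",
--     26: "eze", 27: "dan", 28: "hos", 29: "joe", 30: "amo",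
--     31: "oba", 32: "jon", 33: "mic", 34: "nah", 35: "hab",
--     36: "zep", 37: "hag", 38: "zec", 39: "mal",
--     40: "mat", 41: "mar", 42: "luk", 43: "joh", 44: "act",
--     45: "rom", 46: "1co", 47: "2co", 48: "gal", 49: "eph",
--     50: "php", 51: "col", 52: "1th", 53: "2th", 54: "1ti",
--     55: "2ti", 56: "tit", 57: "phm", 58: "heb", 59: "jas",
--     60: "1pe", 61: "2pe", 62: "1jn", 63: "2jn", 64: "3jn",
--     65: "jud", 66: "rev",
-- }
--
-- def chapters_to_filename(
--     chapters: list[str],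
--     abbr: dict[int, str] | None = None,
-- ) -> str:
--     """
--     Convert a list of 'book:chapter' strings into a compact filename-safe string.
--
--     Groups consecutive chapters per book and collapses them into ranges.
--
--     Args:
--         chapters: list of 'book:chapter' strings, e.g. ['19:1','19:5','20:1']
--         abbr:     book-number -> abbreviation mapping.
--                   Defaults to BOOK_FILENAME_ABBR (English, e.g. 'ps', 'prov').
--                   Pass BOOK_FILENAME_ABBR_ZH_TW for Traditional Chinese (e.g. '詩', '箴').
--
--     Example (English):  ['19:1'...'19:5','20:1'] -> 'ps1-5_prov1'
--     Example (zh_tw):    ['19:1'...'19:5','20:1'] -> '詩1-5_箴1'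
--     """
--     if abbr is None:
--         abbr = BOOK_FILENAME_ABBR
--     if not chapters:
--         return "nodata"
--     parts = []
--     i = 0
--     while i < len(chapters):
--         book_num = int(chapters[i].split(":")[0])
--         ch_num = int(chapters[i].split(":")[1])
--         ch_nums = [ch_num]
--         j = i + 1
--         while j < len(chapters):
--             b, c = chapters[j].split(":")
--             if int(b) == book_num and int(c) == ch_nums[-1] + 1:
--                 ch_nums.append(int(c))
--                 j += 1
--             else:
--                 break
--         i = j
--         book_abbr = abbr.get(book_num, f"b{book_num}")
--         if len(ch_nums) == 1:
--             parts.append(f"{book_abbr}{ch_nums[0]}")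
--         else:
--             parts.append(f"{book_abbr}{ch_nums[0]}-{ch_nums[-1]}")
--     return "_".join(parts)
-- ===== SOURCE B (Python) =====
-- BOOK_FILENAME_ABBR: dict[int, str] = {
--     1: "gen", 2: "exo", 3: "lev", 4: "num", 5: "deu",
--     6: "jos", 7: "jdg", 8: "rut", 9: "1sa", 10: "2sa",
--     11: "1ki", 12: "2ki", 13: "1ch", 14: "2ch", 15: "ezr",
--     16: "neh", 17: "est", 18: "job", 19: "ps", 20: "prov",
--     21: "ecc", 22: "sng", 23: "isa", 24: "jer", 25: "lam",
--     26: "eze", 27: "dan", 28: "hos", 29: "joe", 30: "amo",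
--     31: "oba", 32: "jon", 33: "mic", 34: "nah", 35: "hab",
--     36: "zep", 37: "hag", 38: "zec", 39: "mal",
--     40: "mat", 41: "mar", 42: "luk", 43: "joh", 44: "act",
--     45: "rom", 46: "1co", 47: "2co", 48: "gal", 49: "eph",
--     50: "php", 51: "col", 52: "1th", 53: "2th", 54: "1ti",
--     55: "2ti", 56: "tit", 57: "phm", 58: "heb", 59: "jas",
--     60: "1pe", 61: "2pe", 62: "1jn", 63: "2jn", 64: "3jn",
--     65: "jud", 66: "rev",
-- }
--
--
-- def _flush(abbr, book, start, last):
--     a = abbr.get(book, f"b{book}")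
--     return f"{a}{start}" if start == last else f"{a}{start}-{last}"
--
--
-- def chapters_to_filename(chapters, abbr=None):
--     """Flat single scan with (book, run_start, run_last) state; no nested loops."""
--     if abbr is None:
--         abbr = BOOK_FILENAME_ABBR
--     parsed = []
--     for s in chapters:
--         b, c = s.split(":")
--         parsed.append((int(b), int(c)))
--     if not parsed:
--         return "nodata"
--     parts = []
--     (book, start), last = parsed[0], parsed[0][1]
--     for b, c in parsed[1:]:
--         if b == book and c == last + 1:
--             last = c
--         else:
--             parts.append(_flush(abbr, book, start, last))
--             book, start, last = b, c, c
--     parts.append(_flush(abbr, book, start, last))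
--     return "_".join(parts)
-- ===== Notes on version B (the rewrite author's own statement) =====
-- stated objective: simpler
-- what changed: Replaced the nested while-loops (outer cursor plus inner lookahead collecting a list of chapter numbers) with a parse-once flat scan that keeps only (book, run_start, run_last) state and flushes a part whenever the run breaks.
-- outside the precondition, e.g. on chapters_to_filename(['1:2:3'], None): A returns 'gen2', B raises ValueError
import Mathlib
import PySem

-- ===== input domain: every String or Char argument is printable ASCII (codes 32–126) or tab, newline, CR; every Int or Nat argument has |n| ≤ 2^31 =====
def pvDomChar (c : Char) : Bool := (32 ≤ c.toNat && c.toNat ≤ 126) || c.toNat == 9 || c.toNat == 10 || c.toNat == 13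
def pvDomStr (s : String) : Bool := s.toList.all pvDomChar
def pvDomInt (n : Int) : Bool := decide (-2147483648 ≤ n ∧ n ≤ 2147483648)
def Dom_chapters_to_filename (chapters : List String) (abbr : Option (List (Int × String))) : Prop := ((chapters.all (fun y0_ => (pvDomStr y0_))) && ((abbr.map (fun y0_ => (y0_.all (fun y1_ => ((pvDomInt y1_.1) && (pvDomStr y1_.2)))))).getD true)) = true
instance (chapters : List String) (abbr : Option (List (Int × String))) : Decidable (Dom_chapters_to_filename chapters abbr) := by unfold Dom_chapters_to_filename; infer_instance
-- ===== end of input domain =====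

-- B replaces A's nested while-loops with a parse-once flat scan keeping (book, run_start, run_last) state; objective: simpler. Return-value equivalence only (neither version mutates its arguments).

def BOOK_FILENAME_ABBR : List (Int × String) := [(1, "gen"), (2, "exo"), (3, "lev"), (4, "num"), (5, "deu"),
  (6, "jos"), (7, "jdg"), (8, "rut"), (9, "1sa"), (10, "2sa"),
  (11, "1ki"), (12, "2ki"), (13, "1ch"), (14, "2ch"), (15, "ezr"),
  (16, "neh"), (17, "est"), (18, "job"), (19, "ps"), (20, "prov"),
  (21, "ecc"), (22, "sng"), (23, "isa"), (24, "jer"), (25, "lam"),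
  (26, "eze"), (27, "dan"), (28, "hos"), (29, "joe"), (30, "amo"),
  (31, "oba"), (32, "jon"), (33, "mic"), (34, "nah"), (35, "hab"),
  (36, "zep"), (37, "hag"), (38, "zec"), (39, "mal"),
  (40, "mat"), (41, "mar"), (42, "luk"), (43, "joh"), (44, "act"),
  (45, "rom"), (46, "1co"), (47, "2co"), (48, "gal"), (49, "eph"),
  (50, "php"), (51, "col"), (52, "1th"), (53, "2th"), (54, "1ti"),
  (55, "2ti"), (56, "tit"), (57, "phm"), (58, "heb"), (59, "jas"),
  (60, "1pe"), (61, "2pe"), (62, "1jn"), (63, "2jn"), (64, "3jn"),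
  (65, "jud"), (66, "rev")]

-- s.split(":") with a non-empty separator always succeeds; shared by both ports
def pySplit (s : String) : List String := (PySem.Str.split? s ":").getD []

-- ===== PORT A =====
-- inner 'while j < len(chapters)' loop: extends ch_nums while the next entry is same book, next chapter
def chaptersInnerA (chapters : List String) (book_num : Int) (ch_nums : List Int) (j : Nat) :
    List Int × Nat :=
  if h : j < chapters.length then
    match pySplit chapters[j] with
    | [b, c] =>
      if (PySem.Int.ofStr? b).getD 0 = book_num ∧
          (PySem.Int.ofStr? c).getD 0 = PySem.List.pyGetD ch_nums (-1) 0 + 1 then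
        chaptersInnerA chapters book_num (ch_nums ++ [(PySem.Int.ofStr? c).getD 0]) (j + 1)
      else (ch_nums, j)
    | _ => (ch_nums, j)   -- Python raises ValueError here (unpack of 'b, c ='); excluded by Pre_
  else (ch_nums, j)
termination_by chapters.length - j
decreasing_by exact Nat.sub_succ_lt_self _ _ h

theorem chaptersInnerA_le (chapters : List String) (book_num : Int) (ch_nums : List Int) (j : Nat) :
    j ≤ (chaptersInnerA chapters book_num ch_nums j).2 := by
  fun_induction chaptersInnerA with
  | case1 a b c d e f g ih => exact le_trans (by omega) ih
  | case2 => simp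
  | case3 => simp
  | case4 => simp

-- outer 'while i < len(chapters)' loop, producing the parts list in order
def chaptersOuterA (chapters : List String) (abbrD : PySem.Dict Int String) (i : Nat) :
    List String :=
  if h : i < chapters.length then
    -- int() of split parts; the .getD 0 defaults are unreachable under Pre_ (Python raises there)
    let book_num : Int := (PySem.Int.ofStr? (PySem.List.pyGetD (pySplit chapters[i]) 0 "")).getD 0
    let ch_num : Int := (PySem.Int.ofStr? (PySem.List.pyGetD (pySplit chapters[i]) 1 "")).getD 0
    let r := chaptersInnerA chapters book_num [ch_num] (i + 1)
    let ch_nums := r.1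
    let book_abbr := abbrD.getD book_num ("b" ++ PySem.Int.toStr book_num)
    let part :=
      if ch_nums.length = 1 then
        book_abbr ++ PySem.Int.toStr (PySem.List.pyGetD ch_nums 0 0)
      else
        book_abbr ++ PySem.Int.toStr (PySem.List.pyGetD ch_nums 0 0) ++ "-" ++
          PySem.Int.toStr (PySem.List.pyGetD ch_nums (-1) 0)
    part :: chaptersOuterA chapters abbrD r.2
  else []
termination_by chapters.length - i
decreasing_by
  exact Nat.sub_lt_sub_left h
    (Nat.lt_of_lt_of_le (Nat.lt_succ_self i) (chaptersInnerA_le chapters book_num [ch_num] (i + 1)))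

def chapters_to_filename (chapters : List String) (abbr : Option (List (Int × String))) : String :=
  let abbrD : PySem.Dict Int String :=
    PySem.Dict.ofList (match abbr with | none => BOOK_FILENAME_ABBR | some l => l)
  if chapters = [] then "nodata"
  else PySem.Str.join "_" (chaptersOuterA chapters abbrD 0)

-- ===== PORT B =====
def flushB (abbrD : PySem.Dict Int String) (book start last : Int) : String :=
  let a := abbrD.getD book ("b" ++ PySem.Int.toStr book)
  if start = last then a ++ PySem.Int.toStr start
  else a ++ PySem.Int.toStr start ++ "-" ++ PySem.Int.toStr last

def parseB (s : String) : Int × Int :=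
  match pySplit s with
  | [b, c] => ((PySem.Int.ofStr? b).getD 0, (PySem.Int.ofStr? c).getD 0)
  | _ => (0, 0)   -- Python raises ValueError here; excluded by Pre_

def chapters_to_filename_alt (chapters : List String) (abbr : Option (List (Int × String))) :
    String :=
  let abbrD : PySem.Dict Int String := PySem.Dict.ofList (abbr.getD BOOK_FILENAME_ABBR)
  match chapters.map parseB with
  | [] => "nodata"
  | (b0, c0) :: rest =>
    let st := rest.foldl
      (fun (s : List String × Int × Int × Int) p =>
        if p.1 = s.2.1 ∧ p.2 = s.2.2.2 + 1 then (s.1, s.2.1, s.2.2.1, p.2)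
        else (s.1 ++ [flushB abbrD s.2.1 s.2.2.1 s.2.2.2], p.1, p.2, p.2))
      ([], b0, c0, c0)
    PySem.Str.join "_" (st.1 ++ [flushB abbrD st.2.1 st.2.2.1 st.2.2.2])

-- ===== PRECONDITION & SPEC =====
def chapterOk (s : String) : Bool :=
  match pySplit s with
  | [b, c] => (PySem.Int.ofStr? b).isSome && (PySem.Int.ofStr? c).isSome
  | _ => false

-- Pre_ excludes lists with an entry that does not split on ':' into exactly two int()-parsable
-- fields: on those A raises ValueError/IndexError — except that an entry with extra ':' fields
-- beginning a run is silently truncated by A's positional indexing, where the natural B (strict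
-- two-field unpacking, as A itself does in its inner loop) raises ValueError.
def Pre_chapters_to_filename (chapters : List String) (abbr : Option (List (Int × String))) : Prop :=
  ∀ s ∈ chapters, chapterOk s = true
instance (chapters : List String) (abbr : Option (List (Int × String))) :
    Decidable (Pre_chapters_to_filename chapters abbr) := by
  unfold Pre_chapters_to_filename; infer_instance

def pvWitness_chapters_to_filename : List String × (Option (List (Int × String))) :=
  (["19:1", "19:2", "19:3", "20:1"], none)

def Spec_chapters_to_filename (chapters : List String) (abbr : Option (List (Int × String)))
    (out : String) : Prop := out = chapters_to_filename_alt chapters abbr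
instance (chapters : List String) (abbr : Option (List (Int × String))) (out : String) :
    Decidable (Spec_chapters_to_filename chapters abbr out) := by
  unfold Spec_chapters_to_filename; infer_instance

-- ===== CLAIM (what is proved, stated in full; the proofs are below) =====
def Claim_equal_chapters_to_filename : Prop :=
  ∀ (chapters : List String) (abbr : Option (List (Int × String))),
    Dom_chapters_to_filename chapters abbr → Pre_chapters_to_filename chapters abbr →
      Spec_chapters_to_filename chapters abbr (chapters_to_filename chapters abbr)

-- ===== LEMMAS AND PROOFS =====

-- the chapter numbers collected by the consecutive run starting from state (bk, ls)
def runSeq (bk ls : Int) : List (Int × Int) → List Int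
  | [] => []
  | (b, c) :: t => if b = bk ∧ c = ls + 1 then c :: runSeq bk c t else []

-- the common A = B normal form: one formatted part per maximal consecutive run
def outAll (abbrD : PySem.Dict Int String) : List (Int × Int) → List String
  | [] => []
  | (b, c) :: t =>
    flushB abbrD b c (c + (runSeq b c t).length) ::
      outAll abbrD (t.drop (runSeq b c t).length)
termination_by l => l.length
decreasing_by
  simp only [List.length_drop, List.length_cons]
  exact Nat.lt_succ_of_le (Nat.sub_le _ _)

theorem getLast_of_runSeq (bk : Int) (l : List (Int × Int)) : ∀ (ls : Int),
    (ls :: runSeq bk ls l).getLast (by simp) = ls + (runSeq bk ls l).length := by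
  induction l with
  | nil => intro ls; simp [runSeq]
  | cons p t ih =>
    intro ls
    obtain ⟨b, c⟩ := p
    by_cases h : b = bk ∧ c = ls + 1
    · simp only [runSeq, if_pos h]
      rw [List.getLast_cons (by simp), ih c]
      simp only [List.length_cons]
      omega
    · simp [runSeq, if_neg h]

theorem innerA_spec (chapters : List String) (hok : ∀ s ∈ chapters, chapterOk s = true)
    (bk : Int) : ∀ (j : Nat) (ns : List Int) (hns : ns ≠ []),
    chaptersInnerA chapters bk ns j =
      (ns ++ runSeq bk (ns.getLast hns) ((chapters.map parseB).drop j),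
       j + (runSeq bk (ns.getLast hns) ((chapters.map parseB).drop j)).length) := by
  suffices hmain : ∀ (k j : Nat), chapters.length - j = k → ∀ (ns : List Int) (hns : ns ≠ []),
      chaptersInnerA chapters bk ns j =
        (ns ++ runSeq bk (ns.getLast hns) ((chapters.map parseB).drop j),
         j + (runSeq bk (ns.getLast hns) ((chapters.map parseB).drop j)).length) by
    intro j ns hns; exact hmain _ j rfl ns hns
  intro k
  induction k using Nat.strongRecOn with
  | _ k ih =>
    intro j hk ns hns
    by_cases h : j < chapters.length
    · have hok' := hok _ (List.getElem_mem h)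
      unfold chapterOk at hok'
      have hdrop : (chapters.map parseB).drop j
          = parseB chapters[j] :: (chapters.map parseB).drop (j + 1) := by
        rw [List.drop_eq_getElem_cons (by simpa using h)]
        simp
      rcases hs : pySplit chapters[j] with _ | ⟨b, _ | ⟨c, _ | _⟩⟩ <;>
        rw [hs] at hok' <;> try simp at hok'
      have hparse : parseB chapters[j]
          = ((PySem.Int.ofStr? b).getD 0, (PySem.Int.ofStr? c).getD 0) := by
        simp [parseB, hs]
      unfold chaptersInnerA
      rw [dif_pos h, hs]
      dsimp only
      have hlast : PySem.List.pyGetD ns (-1) 0 = ns.getLast hns :=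
        PySem.List.pyGetD_neg_one _ _ hns
      by_cases hc : (PySem.Int.ofStr? b).getD 0 = bk ∧
          (PySem.Int.ofStr? c).getD 0 = PySem.List.pyGetD ns (-1) 0 + 1
      · rw [if_pos hc]
        have h2 := ih (chapters.length - (j + 1)) (by omega) (j + 1) rfl
          (ns ++ [(PySem.Int.ofStr? c).getD 0]) (by simp)
        have hgl : (ns ++ [(PySem.Int.ofStr? c).getD 0]).getLast (by simp)
            = (PySem.Int.ofStr? c).getD 0 := by simp
        rw [hgl] at h2
        rw [h2, hdrop, hparse]
        simp only [runSeq]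
        rw [if_pos (by exact ⟨hc.1, by rw [hc.2, hlast]⟩)]
        simp only [List.append_assoc, List.singleton_append, List.length_cons,
          Prod.mk.injEq]
        exact ⟨trivial, by omega⟩
      · rw [if_neg hc, hdrop, hparse]
        simp only [runSeq]
        rw [if_neg (by rw [← hlast]; exact hc)]
        simp
    · unfold chaptersInnerA
      rw [dif_neg h, List.drop_eq_nil_of_le (by simpa using Nat.le_of_not_lt h)]
      simp [runSeq]

theorem outerA_spec (chapters : List String) (abbrD : PySem.Dict Int String)
    (hok : ∀ s ∈ chapters, chapterOk s = true) : ∀ (i : Nat),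
    chaptersOuterA chapters abbrD i = outAll abbrD ((chapters.map parseB).drop i) := by
  suffices hmain : ∀ (k i : Nat), chapters.length - i = k →
      chaptersOuterA chapters abbrD i = outAll abbrD ((chapters.map parseB).drop i) by
    intro i; exact hmain _ i rfl
  intro k
  induction k using Nat.strongRecOn with
  | _ k ih =>
    intro i hk
    by_cases h : i < chapters.length
    · have hok' := hok _ (List.getElem_mem h)
      unfold chapterOk at hok'
      have hdrop : (chapters.map parseB).drop i
          = parseB chapters[i] :: (chapters.map parseB).drop (i + 1) := by
        rw [List.drop_eq_getElem_cons (by simpa using h)]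
        simp
      rcases hs : pySplit chapters[i] with _ | ⟨b, _ | ⟨c, _ | _⟩⟩ <;>
        rw [hs] at hok' <;> try simp at hok'
      have hparse : parseB chapters[i]
          = ((PySem.Int.ofStr? b).getD 0, (PySem.Int.ofStr? c).getD 0) := by
        simp [parseB, hs]
      set bi := (PySem.Int.ofStr? b).getD 0 with hbi
      set ci := (PySem.Int.ofStr? c).getD 0 with hci
      unfold chaptersOuterA
      rw [dif_pos h]
      simp only [hs]
      have hb0 : PySem.List.pyGetD [b, c] 0 "" = b := by
        simp [PySem.List.pyGetD, PySem.List.pyGet?, PySem.List.pyIdx?]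
      have hb1 : PySem.List.pyGetD [b, c] 1 "" = c := by
        simp [PySem.List.pyGetD, PySem.List.pyGet?, PySem.List.pyIdx?]
      rw [hb0, hb1]
      have hin := innerA_spec chapters hok bi (i + 1) [ci] (by simp)
      simp only [List.getLast_singleton] at hin
      set seq := runSeq bi ci ((chapters.map parseB).drop (i + 1)) with hseq
      rw [hin]
      have hrec := ih (chapters.length - (i + 1 + seq.length)) (by omega)
        (i + 1 + seq.length) rfl
      rw [hrec, hdrop, hparse]
      simp only [outAll]
      have hdd : (chapters.map parseB).drop (i + 1 + seq.length) =
          ((chapters.map parseB).drop (i + 1)).drop seq.length := by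
        rw [List.drop_drop]
      rw [hdd]
      congr 1
      have hfirst : PySem.List.pyGetD (ci :: seq) 0 0 = ci := by
        simp [PySem.List.pyGetD, PySem.List.pyGet?, PySem.List.pyIdx?]
      have hlast : PySem.List.pyGetD (ci :: seq) (-1) 0 = ci + seq.length := by
        rw [PySem.List.pyGetD_neg_one _ _ (by simp)]
        exact getLast_of_runSeq bi _ ci
      simp only [List.singleton_append, List.length_cons, hfirst, hlast, flushB]
      rw [← hseq]
      by_cases hlen : seq.length = 0
      · rw [if_pos (by omega), if_pos (by rw [hlen]; simp)]
      · rw [if_neg (by omega), if_neg (by intro hh; apply hlen; omega)]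
    · unfold chaptersOuterA
      rw [dif_neg h, List.drop_eq_nil_of_le (by simpa using Nat.le_of_not_lt h)]
      simp [outAll]

theorem foldB_spec (abbrD : PySem.Dict Int String) (l : List (Int × Int)) :
    ∀ (parts : List String) (bk st ls : Int),
    (let r := l.foldl
        (fun (s : List String × Int × Int × Int) p =>
          if p.1 = s.2.1 ∧ p.2 = s.2.2.2 + 1 then (s.1, s.2.1, s.2.2.1, p.2)
          else (s.1 ++ [flushB abbrD s.2.1 s.2.2.1 s.2.2.2], p.1, p.2, p.2))
        (parts, bk, st, ls);
      r.1 ++ [flushB abbrD r.2.1 r.2.2.1 r.2.2.2]) =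
    parts ++ flushB abbrD bk st (ls + (runSeq bk ls l).length) ::
      outAll abbrD (l.drop (runSeq bk ls l).length) := by
  induction l with
  | nil => intro parts bk st ls; simp [runSeq, outAll]
  | cons p t ih =>
    intro parts bk st ls
    obtain ⟨b, c⟩ := p
    simp only [List.foldl_cons]
    by_cases hc : b = bk ∧ c = ls + 1
    · rw [if_pos (by simpa using hc)]
      have := ih parts bk st c
      simp only at this ⊢
      rw [this]
      simp only [runSeq, if_pos hc, List.length_cons, List.drop_succ_cons]
      congr 3
      omega
    · rw [if_neg (by simpa using hc)]
      have := ih (parts ++ [flushB abbrD bk st ls]) b c c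
      simp only at this ⊢
      rw [this]
      have hnil : runSeq bk ls ((b, c) :: t) = [] := by simp [runSeq, hc]
      rw [hnil]
      simp only [List.length_nil, Nat.cast_zero, add_zero, List.drop_zero, List.append_assoc,
        List.singleton_append]
      conv_rhs => rw [outAll.eq_def]

theorem core_eq (chapters : List String) (hok : ∀ s ∈ chapters, chapterOk s = true)
    (d : List (Int × String)) :
    (if chapters = [] then "nodata"
     else PySem.Str.join "_" (chaptersOuterA chapters (PySem.Dict.ofList d) 0)) =
    (match chapters.map parseB with
     | [] => "nodata"
     | (b0, c0) :: rest =>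
       let st := rest.foldl (fun (s : List String × Int × Int × Int) p =>
          if p.1 = s.2.1 ∧ p.2 = s.2.2.2 + 1 then (s.1, s.2.1, s.2.2.1, p.2)
          else (s.1 ++ [flushB (PySem.Dict.ofList d) s.2.1 s.2.2.1 s.2.2.2], p.1, p.2, p.2))
         ([], b0, c0, c0);
       PySem.Str.join "_" (st.1 ++ [flushB (PySem.Dict.ofList d) st.2.1 st.2.2.1 st.2.2.2])) := by
  rcases chapters with _ | ⟨s, rest⟩
  · rfl
  · rw [if_neg (by simp)]
    have hA := outerA_spec (s :: rest) (PySem.Dict.ofList d) hok 0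
    rw [List.drop_zero] at hA
    rw [hA]
    simp only [List.map_cons]
    rcases hp : parseB s with ⟨b0, c0⟩
    have hB := foldB_spec (PySem.Dict.ofList d) (rest.map parseB) [] b0 c0 c0
    simp only at hB ⊢
    rw [hB]
    simp only [List.nil_append]
    rw [outAll.eq_def]

-- ===== VERDICT (by name: the statement is the Claim_ definition above) =====
theorem chapters_to_filename_spec : Claim_equal_chapters_to_filename := by
  intro chapters abbr _hdom hpre
  cases abbr with
  | none => exact core_eq chapters hpre BOOK_FILENAME_ABBR
  | some l => exact core_eq chapters hpre l
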